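-- pv_equiv track=rewrite | github.com/Dish365/fontaine_sante_scos | backend/fastapi/app/services/calculation_service.py | _check_environmental_certifications
-- ===== SOURCE A (Python) =====
-- from typing import Dict, Any, List
--
-- def _check_environmental_certifications(
--
--     certifications: List[str]
-- ) -> Dict[str, bool]:
--     required_certs = {
--         "ISO14001": False,
--         "ISO50001": False,
--         "LEED": False
--     }
--     for cert in certifications:
--         if cert in required_certs:
--             required_certs[cert] = True
--     return required_certs
-- ===== SOURCE B (Python) =====
-- from typing import Dict, List
--
--
-- def _found(key: str, certs: List[str]) -> bool:
--     """Short-circuit linear search: scan certs until key is seen."""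
--     for c in certs:
--         if c == key:
--             return True
--     return False
--
--
-- def _check_environmental_certifications(
--     certifications: List[str]
-- ) -> Dict[str, bool]:
--     # Three independent early-exit scans, one per required certification,
--     # instead of one pass over the input mutating an accumulator dict.
--     return {
--         "ISO14001": _found("ISO14001", certifications),
--         "ISO50001": _found("ISO50001", certifications),
--         "LEED": _found("LEED", certifications),
--     }
-- ===== Notes on version B (the rewrite author's own statement) =====
-- stated objective: alternative
-- what changed: B replaces A's single pass that mutates a pre-filled accumulator dict over all n inputs by three independent short-circuit linear searches (one per required certification, each stopping at the first match), with no dict mutation or hashing of the inputs.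
import Mathlib
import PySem

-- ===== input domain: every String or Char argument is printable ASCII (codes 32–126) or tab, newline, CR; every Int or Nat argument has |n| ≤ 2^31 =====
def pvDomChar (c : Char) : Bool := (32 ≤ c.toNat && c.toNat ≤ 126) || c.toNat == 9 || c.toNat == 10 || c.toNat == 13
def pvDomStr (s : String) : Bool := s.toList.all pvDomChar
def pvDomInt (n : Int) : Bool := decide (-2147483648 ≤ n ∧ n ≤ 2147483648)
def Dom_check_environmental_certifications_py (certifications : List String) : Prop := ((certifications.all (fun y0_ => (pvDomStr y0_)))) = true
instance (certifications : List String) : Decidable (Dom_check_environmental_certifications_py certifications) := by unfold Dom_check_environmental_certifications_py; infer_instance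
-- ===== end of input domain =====

-- B replaces A's single accumulator-dict pass over the inputs by three independent
-- short-circuit linear searches, one per required certification (alternative decomposition).

-- ===== PORT A =====
def check_environmental_certifications_py (certifications : List String) : List (String × Bool) :=
  (certifications.foldl
    (fun d cert => if d.contains cert then d.insert cert true else d)
    (PySem.Dict.ofList [("ISO14001", false), ("ISO50001", false), ("LEED", false)])).items

-- ===== PORT B =====
-- early-exit linear search, as in Source B's _found
def pvFound (key : String) : List String → Bool
  | [] => false
  | c :: cs => if c == key then true else pvFound key cs

def check_environmental_certifications_py_alt (certifications : List String) : List (String × Bool) :=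
  [("ISO14001", pvFound "ISO14001" certifications),
   ("ISO50001", pvFound "ISO50001" certifications),
   ("LEED", pvFound "LEED" certifications)]

-- ===== PRECONDITION & SPEC =====
def Spec_check_environmental_certifications_py (certifications : List String) (out : List (String × Bool)) : Prop := out = check_environmental_certifications_py_alt certifications
instance (certifications : List String) (out : List (String × Bool)) : Decidable (Spec_check_environmental_certifications_py certifications out) := by unfold Spec_check_environmental_certifications_py; infer_instance

-- ===== CLAIM (what is proved, stated in full; the proofs are below) =====
def Claim_equal_check_environmental_certifications_py : Prop := ∀ (certifications : List String), Dom_check_environmental_certifications_py certifications → Spec_check_environmental_certifications_py certifications (check_environmental_certifications_py certifications)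

-- ===== LEMMAS AND PROOFS =====

-- B's early-exit search agrees with list membership.
theorem pvFound_eq_contains (key : String) (l : List String) :
    pvFound key l = l.contains key := by
  induction l with
  | nil => rfl
  | cons x xs ih =>
    simp [pvFound, ih]
    by_cases h : x = key
    · simp [h]
    · simp [h, Ne.symm h]

-- Loop invariant for A: folding over any cert list from the 3-key dict with values a b c
-- yields the same dict with each value OR-ed with membership of its key in the list.
theorem pv_fold_inv (l : List String) (a b c : Bool) :
    l.foldl (fun d cert => if d.contains cert then d.insert cert true else d)
      (PySem.Dict.mk [("ISO14001", a), ("ISO50001", b), ("LEED", c)])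
    = PySem.Dict.mk [("ISO14001", a || l.contains "ISO14001"),
                     ("ISO50001", b || l.contains "ISO50001"),
                     ("LEED", c || l.contains "LEED")] := by
  induction l generalizing a b c with
  | nil => simp
  | cons x xs ih =>
    simp only [List.foldl_cons]
    by_cases h1 : x = "ISO14001"
    · subst h1
      rw [show (if (PySem.Dict.mk [("ISO14001", a), ("ISO50001", b), ("LEED", c)]).contains "ISO14001" then (PySem.Dict.mk [("ISO14001", a), ("ISO50001", b), ("LEED", c)]).insert "ISO14001" true else (PySem.Dict.mk [("ISO14001", a), ("ISO50001", b), ("LEED", c)])) = PySem.Dict.mk [("ISO14001", true), ("ISO50001", b), ("LEED", c)] from by simp [PySem.Dict.contains, PySem.Dict.insert], ih]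
      simp
    by_cases h2 : x = "ISO50001"
    · subst h2
      rw [show (if (PySem.Dict.mk [("ISO14001", a), ("ISO50001", b), ("LEED", c)]).contains "ISO50001" then (PySem.Dict.mk [("ISO14001", a), ("ISO50001", b), ("LEED", c)]).insert "ISO50001" true else (PySem.Dict.mk [("ISO14001", a), ("ISO50001", b), ("LEED", c)])) = PySem.Dict.mk [("ISO14001", a), ("ISO50001", true), ("LEED", c)] from by simp [PySem.Dict.contains, PySem.Dict.insert], ih]
      simp
    by_cases h3 : x = "LEED"
    · subst h3
      rw [show (if (PySem.Dict.mk [("ISO14001", a), ("ISO50001", b), ("LEED", c)]).contains "LEED" then (PySem.Dict.mk [("ISO14001", a), ("ISO50001", b), ("LEED", c)]).insert "LEED" true else (PySem.Dict.mk [("ISO14001", a), ("ISO50001", b), ("LEED", c)])) = PySem.Dict.mk [("ISO14001", a), ("ISO50001", b), ("LEED", true)] from by simp [PySem.Dict.contains, PySem.Dict.insert], ih]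
      simp
    · rw [show (if (PySem.Dict.mk [("ISO14001", a), ("ISO50001", b), ("LEED", c)]).contains x then (PySem.Dict.mk [("ISO14001", a), ("ISO50001", b), ("LEED", c)]).insert x true else (PySem.Dict.mk [("ISO14001", a), ("ISO50001", b), ("LEED", c)])) = PySem.Dict.mk [("ISO14001", a), ("ISO50001", b), ("LEED", c)] from by simp [PySem.Dict.contains, Ne.symm h1, Ne.symm h2, Ne.symm h3], ih]
      simp [Ne.symm h1, Ne.symm h2, Ne.symm h3]

-- ===== VERDICT (by name: the statement is the Claim_ definition above) =====
theorem check_environmental_certifications_py_spec : Claim_equal_check_environmental_certifications_py := by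
  intro certifications _
  unfold Spec_check_environmental_certifications_py
  unfold check_environmental_certifications_py check_environmental_certifications_py_alt
  rw [show PySem.Dict.ofList [("ISO14001", false), ("ISO50001", false), ("LEED", false)] = PySem.Dict.mk [("ISO14001", false), ("ISO50001", false), ("LEED", false)] from by decide]
  rw [pv_fold_inv]
  simp [pvFound_eq_contains]
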